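-- pv_equiv track=rewrite | github.com/career-prep/ucp-namer-latam-2026 | aungnanda_oo/q5_FirstKBinaryNumbers.py | firstKBinaryNumbers
-- ===== SOURCE A (Python) =====
-- from collections import deque
--
-- def firstKBinaryNumbers(k):
--     if k == 0:
--         return []
--     result = ["0"]
--     queue = deque(["1"])
--     while len(result) < k:
--         curr = queue.popleft()
--         result.append(curr)
--         queue.append(curr + "0")
--         queue.append(curr + "1")
--     return result
-- ===== SOURCE B (Python) =====
-- def firstKBinaryNumbers(k):
--     if k == 0:
--         return []
--     result = ["0"]
--     i = 1
--     while len(result) < k: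
--         result.append(bin(i)[2:])
--         i += 1
--     return result
-- ===== Notes on version B (the rewrite author's own statement) =====
-- stated objective: simpler
-- what changed: Replaced the deque-based BFS that builds each binary string by concatenating children onto a queue with a plain counter loop that converts each integer i directly to its binary representation (bin(i)[2:]), keeping no queue at all.
import Mathlib
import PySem

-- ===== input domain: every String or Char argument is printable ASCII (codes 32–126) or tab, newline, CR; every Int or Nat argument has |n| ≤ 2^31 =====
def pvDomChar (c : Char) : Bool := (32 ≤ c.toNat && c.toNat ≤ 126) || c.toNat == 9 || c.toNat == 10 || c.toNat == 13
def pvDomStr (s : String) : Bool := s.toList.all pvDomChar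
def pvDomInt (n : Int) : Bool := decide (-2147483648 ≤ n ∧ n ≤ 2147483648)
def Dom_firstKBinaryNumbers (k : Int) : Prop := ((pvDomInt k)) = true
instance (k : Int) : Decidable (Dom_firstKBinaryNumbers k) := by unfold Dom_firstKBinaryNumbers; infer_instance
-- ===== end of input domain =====

-- B replaces A's deque-based BFS over child strings by direct integer→binary conversion of a counter (simpler; same cost).

-- ===== PORT A =====
-- the while loop: each iteration pops the queue head, appends it to result and pushes its two children;
-- fuel k.toNat is enough since every iteration grows result by one and the loop runs only while result.length < k
def fkbnLoopA : Nat → Int → List String → List String → List String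
  | 0, _, result, _ => result
  | fuel + 1, k, result, queue =>
    if (result.length : Int) < k then
      match queue with
      | [] => result          -- unreachable: the queue is never empty while the loop runs
      | curr :: rest => fkbnLoopA fuel k (result ++ [curr]) (rest ++ [curr ++ "0", curr ++ "1"])
    else result

def firstKBinaryNumbers (k : Int) : List String :=
  if k = 0 then []
  else fkbnLoopA k.toNat k ["0"] ["1"]

-- ===== PORT B =====
-- bin(i)[2:] for i ≥ 1 (B only ever calls it with i ≥ 1): binary digits of i, most significant first
def pyBinChars (n : Nat) : List Char :=
  if n = 0 then []
  else pyBinChars (n / 2) ++ [if n % 2 == 1 then '1' else '0']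
decreasing_by exact Nat.div_lt_self (Nat.pos_of_ne_zero (by assumption)) (by omega)

def pyBin (n : Nat) : String := String.ofList (pyBinChars n)

def fkbnLoopB : Nat → Int → Nat → List String → List String
  | 0, _, _, result => result
  | fuel + 1, k, i, result =>
    if (result.length : Int) < k then
      fkbnLoopB fuel k (i + 1) (result ++ [pyBin i])
    else result

def firstKBinaryNumbers_alt (k : Int) : List String :=
  if k = 0 then []
  else fkbnLoopB k.toNat k 1 ["0"]

-- ===== PRECONDITION & SPEC =====
def Spec_firstKBinaryNumbers (k : Int) (out : List String) : Prop := out = firstKBinaryNumbers_alt k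
instance (k : Int) (out : List String) : Decidable (Spec_firstKBinaryNumbers k out) := by unfold Spec_firstKBinaryNumbers; infer_instance

-- ===== CLAIM (what is proved, stated in full; the proofs are below) =====
def Claim_equal_firstKBinaryNumbers : Prop := ∀ (k : Int), Dom_firstKBinaryNumbers k → Spec_firstKBinaryNumbers k (firstKBinaryNumbers k)

-- ===== LEMMAS AND PROOFS =====

lemma pyBinChars_two_mul (i : Nat) (hi : 1 ≤ i) :
    pyBinChars (2 * i) = pyBinChars i ++ ['0'] := by
  rw [pyBinChars]
  have h2 : ¬ (2 * i = 0) := by omega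
  simp [h2, Nat.mul_div_cancel_left i (by omega : 0 < 2), Nat.mul_mod_right]

lemma pyBinChars_two_mul_add_one (i : Nat) :
    pyBinChars (2 * i + 1) = pyBinChars i ++ ['1'] := by
  rw [pyBinChars]
  have h2 : ¬ (2 * i + 1 = 0) := by omega
  simp [Nat.mul_add_div (by omega : 0 < 2)]

lemma pyBin_append_zero (i : Nat) (hi : 1 ≤ i) :
    pyBin i ++ "0" = pyBin (2 * i) := by
  have : ("0" : String) = String.ofList ['0'] := by decide
  rw [pyBin, pyBin, pyBinChars_two_mul i hi, this, ← String.ofList_append]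

lemma pyBin_append_one (i : Nat) :
    pyBin i ++ "1" = pyBin (2 * i + 1) := by
  have : ("1" : String) = String.ofList ['1'] := by decide
  rw [pyBin, pyBin, pyBinChars_two_mul_add_one i, this, ← String.ofList_append]

-- queue invariant: when B's counter is i, A's queue holds the binary strings of i, i+1, …, 2i−1
lemma fkbnLoop_eq (fuel : Nat) : ∀ (k : Int) (i : Nat), 1 ≤ i → ∀ (result : List String),
    fkbnLoopA fuel k result ((List.range' i i).map pyBin) = fkbnLoopB fuel k i result := by
  induction fuel with
  | zero => intro k i _ result; rfl
  | succ fuel ih =>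
    intro k i hi result
    obtain ⟨j, rfl⟩ : ∃ j, i = j + 1 := ⟨i - 1, by omega⟩
    simp only [fkbnLoopA, fkbnLoopB]
    by_cases h : (result.length : Int) < k
    · rw [List.range'_succ, List.map_cons]
      simp only [h, if_pos]
      have hrest : (List.range' (j+1+1) j).map pyBin ++ [pyBin (j+1) ++ "0", pyBin (j+1) ++ "1"]
          = (List.range' (j+2) (j+2)).map pyBin := by
        rw [pyBin_append_zero (j+1) (by omega), pyBin_append_one (j+1),
            List.range'_1_concat, List.range'_1_concat, List.map_append, List.map_append]
        simp [show j+2+j = 2*(j+1) by ring, show j+2+(j+1) = 2*(j+1)+1 by ring]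
      rw [show j+1+1 = j+2 from rfl] at *
      rw [hrest]
      exact ih k (j+2) (by omega) (result ++ [pyBin (j+1)])
    · simp only [h, if_neg, not_false_eq_true]

lemma pyBinChars_zero : pyBinChars 0 = [] := by rw [pyBinChars]; simp

lemma pyBin_one : pyBin 1 = "1" := by
  rw [pyBin, pyBinChars, pyBinChars_zero]
  · decide


-- ===== VERDICT (by name: the statement is the Claim_ definition above) =====
theorem firstKBinaryNumbers_spec : Claim_equal_firstKBinaryNumbers := by
  intro k _
  unfold Spec_firstKBinaryNumbers firstKBinaryNumbers firstKBinaryNumbers_alt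
  by_cases hk : k = 0
  · simp [hk]
  · simp only [hk, if_neg, not_false_eq_true]
    have h1 : (List.range' 1 1).map pyBin = ["1"] := by
      simp [List.range', pyBin_one]
    rw [← h1, fkbnLoop_eq k.toNat k 1 (by omega) ["0"]]
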